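-- pv_equiv track=rewrite | github.com/benp10/adventofcode | 2025/invalid_ids.py | is_invalid_id_part_two
-- ===== SOURCE A (Python) =====
-- def is_invalid_id_part_two(num: int) -> int:
--     middle = int(len(str(num)) / 2)
--     for nof_digits in range(1, middle + 1):
--         pattern = str(num)[:nof_digits]
--         repeat = str(num).count(pattern)
--         if nof_digits * repeat == len(str(num)):
--             return True
--     return False
-- ===== SOURCE B (Python) =====
-- def is_invalid_id_part_two(num: int) -> int:
--     s = str(num)
--     return s in (s + s)[1:-1]
-- ===== Notes on version B (the rewrite author's own statement) =====
-- stated objective: simpler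
-- what changed: Replaces A's loop over candidate prefix lengths with str.count per length by the single doubled-string containment test s in (s+s)[1:-1].
import Mathlib
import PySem

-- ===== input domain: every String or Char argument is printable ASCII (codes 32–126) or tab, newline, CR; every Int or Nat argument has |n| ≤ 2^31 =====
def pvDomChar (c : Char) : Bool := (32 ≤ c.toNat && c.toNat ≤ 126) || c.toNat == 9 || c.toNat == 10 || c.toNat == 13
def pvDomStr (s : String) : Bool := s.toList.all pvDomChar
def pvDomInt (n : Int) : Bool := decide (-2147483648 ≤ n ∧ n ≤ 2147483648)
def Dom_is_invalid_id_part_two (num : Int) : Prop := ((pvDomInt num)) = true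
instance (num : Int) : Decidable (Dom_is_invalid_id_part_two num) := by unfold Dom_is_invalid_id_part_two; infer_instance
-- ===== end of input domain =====

-- B replaces A's loop over prefix lengths with `str.count` by the doubled-string idiom
-- `s in (s + s)[1:-1]` (objective: simpler — one containment test instead of a counting loop).


-- ===== PORT A =====
-- the 'for nof_digits in range(1, middle + 1)' loop with its early 'return True'
def pvALoop (num : Int) : List Int → Bool
  | [] => false
  | d :: ds =>
    let pattern := PySem.List.slice (PySem.Int.toChars num) none (some d)
    let rpt : Nat := PySem.Chars.count (PySem.Int.toChars num) pattern
    if d * (rpt : Int) == (PySem.Chars.len (PySem.Int.toChars num) : Int) then true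
    else pvALoop num ds

def is_invalid_id_part_two (num : Int) : Bool :=
  let middle := PySem.Int.truncdiv ((PySem.Chars.len (PySem.Int.toChars num) : Int)) 2
  pvALoop num (PySem.List.pyRange 1 (middle + 1) 1)

-- ===== PORT B =====
def is_invalid_id_part_two_alt (num : Int) : Bool :=
  let s := PySem.Int.toChars num
  PySem.Chars.isIn s (PySem.List.slice (s ++ s) (some 1) (some (-1)))

-- ===== PRECONDITION & SPEC =====
def Spec_is_invalid_id_part_two (num : Int) (out : Bool) : Prop := out = is_invalid_id_part_two_alt num
instance (num : Int) (out : Bool) : Decidable (Spec_is_invalid_id_part_two num out) := by unfold Spec_is_invalid_id_part_two; infer_instance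

-- ===== CLAIM (what is proved, stated in full; the proofs are below) =====
def Claim_equal_is_invalid_id_part_two : Prop := ∀ (num : Int), Dom_is_invalid_id_part_two num → Spec_is_invalid_id_part_two num (is_invalid_id_part_two num)

-- ===== LEMMAS AND PROOFS =====

-- str(num) is never the empty string
theorem pv_toDigitsCore_len (b : Nat) : ∀ (fuel n : Nat) (ds : List Char),
    ds.length ≤ (Nat.toDigitsCore b fuel n ds).length := by
  intro fuel
  induction fuel with
  | zero => intro n ds; simp [Nat.toDigitsCore]
  | succ fuel ih =>
    intro n ds
    simp only [Nat.toDigitsCore]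
    split
    · simp
    · exact le_trans (by simp) (ih _ (_ :: ds))

theorem pv_toChars_ne_nil (n : Int) : PySem.Int.toChars n ≠ [] := by
  unfold PySem.Int.toChars
  split
  · simp
  · unfold Nat.toDigits
    intro h
    have := pv_toDigitsCore_len 10 (n.toNat + 1) n.toNat []
    rw [show Nat.toDigitsCore 10 (n.toNat + 1) n.toNat [] =
        (if n.toNat / 10 = 0 then [(n.toNat % 10).digitChar]
         else Nat.toDigitsCore 10 n.toNat (n.toNat / 10) [(n.toNat % 10).digitChar]) from rfl] at h
    split at h
    · simp at h
    · have := pv_toDigitsCore_len 10 n.toNat (n.toNat / 10) [(n.toNat % 10).digitChar]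
      rw [h] at this
      simp at this

-- the greedy non-overlapping counter: upper bound, with equality exactly at a tiling
theorem pv_go_spec (p : List Char) (hp : 0 < p.length) :
    ∀ (fuel : Nat) (l : List Char) (acc : Nat), l.length ≤ fuel →
    ∃ k, PySem.Chars.count.go p fuel l acc = acc + k ∧ p.length * k ≤ l.length ∧
      (p.length * k = l.length → (List.replicate k p).flatten = l) := by
  intro fuel
  induction fuel with
  | zero =>
    intro l acc hl
    have : l = [] := List.eq_nil_of_length_eq_zero (by omega)
    subst this
    exact ⟨0, by simp [PySem.Chars.count.go], by simp, by simp⟩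
  | succ fuel ih =>
    intro l acc hl
    match l with
    | [] => exact ⟨0, by simp [PySem.Chars.count.go], by simp, by simp⟩
    | h :: t =>
      rw [show PySem.Chars.count.go p (fuel + 1) (h :: t) acc =
          (if p.isPrefixOf (h :: t) then PySem.Chars.count.go p fuel ((h :: t).drop p.length) (acc + 1)
           else PySem.Chars.count.go p fuel t acc) from rfl]
      split
      · rename_i hpre
        have hpre' : p <+: (h :: t) := List.isPrefixOf_iff_prefix.mp hpre
        have hplen : p.length ≤ (h :: t).length := hpre'.length_le
        have hdlen : ((h :: t).drop p.length).length = (h :: t).length - p.length := by simp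
        obtain ⟨k, hgo, hle, heq⟩ := ih ((h :: t).drop p.length) (acc + 1)
          (by simp only [List.length_drop, List.length_cons] at hl ⊢; omega)
        refine ⟨k + 1, by rw [hgo]; omega, by rw [hdlen] at hle; ring_nf; ring_nf at hle; omega, ?_⟩
        intro hkeq
        have : p.length * k = ((h :: t).drop p.length).length := by rw [hdlen]; ring_nf; ring_nf at hkeq; omega
        have htail := heq this
        rw [List.replicate_succ, List.flatten_cons, htail]
        exact List.prefix_iff_eq_append.mp hpre'
      · obtain ⟨k, hgo, hle, _⟩ := ih t acc (by simp at hl ⊢; omega)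
        refine ⟨k, hgo, by simp; omega, ?_⟩
        intro hkeq
        simp at hkeq
        omega

-- the greedy counter counts a perfect tiling exactly
theorem pv_go_tiling (p : List Char) (hp : 0 < p.length) :
    ∀ (k : Nat) (fuel acc : Nat), (List.replicate k p).flatten.length ≤ fuel →
    PySem.Chars.count.go p fuel ((List.replicate k p).flatten) acc = acc + k := by
  intro k
  induction k with
  | zero =>
    intro fuel acc _
    cases fuel <;> simp [PySem.Chars.count.go]
  | succ k ih =>
    intro fuel acc hfuel
    have hflat : (List.replicate (k + 1) p).flatten = p ++ (List.replicate k p).flatten := by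
      rw [List.replicate_succ, List.flatten_cons]
    have hlen : (List.replicate (k + 1) p).flatten.length = p.length + (List.replicate k p).flatten.length := by
      rw [hflat]; simp
    obtain ⟨fuel', hf⟩ : ∃ fuel', fuel = fuel' + 1 := by
      cases fuel with
      | zero => rw [hlen] at hfuel; omega
      | succ f => exact ⟨f, rfl⟩
    subst hf
    obtain ⟨h, t, hcons⟩ := List.exists_cons_of_ne_nil
      (show (List.replicate (k + 1) p).flatten ≠ [] by
        intro hn; rw [hn] at hlen; simp at hlen; omega)
    rw [hcons]
    rw [show PySem.Chars.count.go p (fuel' + 1) (h :: t) acc =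
        (if p.isPrefixOf (h :: t) then PySem.Chars.count.go p fuel' ((h :: t).drop p.length) (acc + 1)
         else PySem.Chars.count.go p fuel' t acc) from rfl]
    have hpre : p.isPrefixOf (h :: t) := by
      rw [← hcons, hflat]
      exact List.isPrefixOf_iff_prefix.mpr (List.prefix_append _ _)
    rw [if_pos hpre]
    have hdrop : (h :: t).drop p.length = (List.replicate k p).flatten := by
      rw [← hcons, hflat, List.drop_left]
    rw [hdrop, ih fuel' (acc + 1) (by rw [hlen] at hfuel; omega)]
    omega

-- commuting words tile: |t| = |p|·k and p ++ t = t ++ p imply t = p^k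
theorem pv_comm_tiling (p : List Char) :
    ∀ (k : Nat) (t : List Char), t.length = p.length * k → p ++ t = t ++ p →
    t = (List.replicate k p).flatten := by
  intro k
  induction k with
  | zero =>
    intro t hlen _
    rw [Nat.mul_zero] at hlen
    simp [List.eq_nil_of_length_eq_zero hlen]
  | succ k ih =>
    intro t hlen hcomm
    have hple : p.length ≤ t.length := by rw [hlen]; nlinarith [Nat.zero_le p.length]
    have htake : t.take p.length = p := by
      have h1 : (p ++ t).take p.length = p := List.take_left
      have h2 : (t ++ p).take p.length = t.take p.length := by
        rw [List.take_append, Nat.sub_eq_zero_of_le hple]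
        simp
      rw [hcomm] at h1; rw [h2] at h1; exact h1
    have hsplit : t = p ++ t.drop p.length := by
      conv_lhs => rw [← List.take_append_drop p.length t, htake]
    have hcomm' : p ++ t.drop p.length = t.drop p.length ++ p := by
      apply List.append_cancel_left (as := p)
      calc p ++ (p ++ t.drop p.length) = p ++ t := by rw [← hsplit]
        _ = (p ++ t.drop p.length) ++ p := by rw [hcomm]; rw [← hsplit]
        _ = p ++ (t.drop p.length ++ p) := by simp
    have hlen' : (t.drop p.length).length = p.length * k := by
      simp; rw [hlen]; ring_nf; omega
    have := ih (t.drop p.length) hlen' hcomm'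
    rw [List.replicate_succ, List.flatten_cons, ← this, ← hsplit]

-- rotation self-fixes are multiples of the least positive one
theorem pv_rot_dvd (s : List Char) (d : Nat) (hd : 0 < d ∧ s.rotate d = s)
    (hmin : ∀ m, m < d → ¬(0 < m ∧ s.rotate m = s)) :
    ∀ j, s.rotate j = s → d ∣ j := by
  intro j
  induction j using Nat.strong_induction_on with
  | _ j ih =>
    intro hj
    by_cases h0 : j = 0
    · simp [h0]
    · by_cases hlt : j < d
      · exact absurd ⟨Nat.pos_of_ne_zero h0, hj⟩ (hmin j hlt)
      · rw [Nat.not_lt] at hlt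
        have hsub : s.rotate (j - d) = s := by
          apply List.rotate_injective d
          show (s.rotate (j - d)).rotate d = s.rotate d
          rw [List.rotate_rotate, Nat.sub_add_cancel hlt, hj, hd.2]
        have hdd := ih (j - d) (by omega) hsub
        have := Nat.dvd_add hdd (dvd_refl d)
        rwa [Nat.sub_add_cancel hlt] at this

-- A's loop returns true iff some listed prefix length passes A's test
theorem pv_aLoop_iff (num : Int) (ds : List Int) :
    pvALoop num ds = true ↔ ∃ d ∈ ds,
      (d * ((PySem.Chars.count (PySem.Int.toChars num)
              (PySem.List.slice (PySem.Int.toChars num) none (some d)) : Nat) : Int)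
        = PySem.Chars.len (PySem.Int.toChars num)) := by
  induction ds with
  | nil => simp [pvALoop]
  | cons d ds ih =>
    simp only [pvALoop, beq_iff_eq]
    split
    · rename_i h
      simp only [true_iff]
      exact ⟨d, by simp, by exact_mod_cast h⟩
    · rename_i h
      rw [ih]
      constructor
      · rintro ⟨e, he, heq⟩; exact ⟨e, by simp [he], heq⟩
      · rintro ⟨e, he, heq⟩
        rcases List.mem_cons.mp he with rfl | he'
        · exact absurd heq h
        · exact ⟨e, he', heq⟩

-- A's per-length test, for 1 ≤ n ≤ L, is exactly "prefix of length n tiles s"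
theorem pv_cond_iff (s : List Char) (n : Nat) (h1 : 1 ≤ n) (hn : n ≤ s.length) :
    (n * PySem.Chars.count s (s.take n) = s.length) ↔
      (n ∣ s.length ∧ (List.replicate (s.length / n) (s.take n)).flatten = s) := by
  have hlentake : (s.take n).length = n := by simp; omega
  have hpne : s.take n ≠ [] := by
    intro h; rw [h] at hlentake; simp at hlentake; omega
  have hcount : PySem.Chars.count s (s.take n)
      = PySem.Chars.count.go (s.take n) s.length s 0 := by
    unfold PySem.Chars.count
    rw [if_neg (by simp [hpne])]
  constructor
  · intro hcond
    obtain ⟨k, hgo, hle, heq⟩ := pv_go_spec (s.take n) (by omega) s.length s 0 le_rfl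
    rw [hcount, hgo] at hcond
    simp at hcond
    have hmul : n * k = s.length := hcond
    have htile := heq (by rw [hlentake]; exact hmul)
    have hdvd : n ∣ s.length := ⟨k, hmul.symm⟩
    have hdk : s.length / n = k := by rw [← hmul, Nat.mul_div_cancel_left _ (by omega)]
    exact ⟨hdvd, by rw [hdk]; exact htile⟩
  · rintro ⟨hdvd, htile⟩
    have hmul : n * (s.length / n) = s.length := Nat.mul_div_cancel' hdvd
    have := pv_go_tiling (s.take n) (by omega) (s.length / n) s.length 0
      (by rw [htile])
    rw [htile] at this
    rw [hcount, this]
    simpa using hmul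

theorem pv_A_iff (num : Int) (hs : PySem.Int.toChars num ≠ []) :
    is_invalid_id_part_two num = true ↔
      ∃ d : Nat, 1 ≤ d ∧ d ≤ (PySem.Int.toChars num).length / 2 ∧
        d ∣ (PySem.Int.toChars num).length ∧
        (List.replicate ((PySem.Int.toChars num).length / d)
          ((PySem.Int.toChars num).take d)).flatten = PySem.Int.toChars num := by
  set s := PySem.Int.toChars num with hsdef
  have hL : 0 < s.length := List.length_pos_iff.mpr hs
  have hmid : PySem.Int.truncdiv ((PySem.Chars.len s : Int)) 2 = ((s.length / 2 : Nat) : Int) := by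
    rw [PySem.Chars.len_eq]
    simp [PySem.Int.truncdiv, Int.tdiv_eq_ediv]
  show pvALoop num (PySem.List.pyRange 1 (PySem.Int.truncdiv ((PySem.Chars.len s : Int)) 2 + 1) 1) = true ↔ _
  rw [hmid, pv_aLoop_iff]
  constructor
  · rintro ⟨d, hmem, hcond⟩
    rw [PySem.List.mem_pyRange_one] at hmem
    obtain ⟨hd1, hd2⟩ := hmem
    have hdn : d = ((d.toNat : Nat) : Int) := by omega
    set n := d.toNat with hndef
    have hn1 : 1 ≤ n := by omega
    have hn2 : n ≤ s.length / 2 := by omega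
    rw [PySem.List.slice_to s (by omega)] at hcond
    rw [PySem.Chars.len_eq] at hcond
    have hcond' : n * PySem.Chars.count s (s.take n) = s.length := by
      rw [hdn] at hcond
      exact_mod_cast hcond
    obtain ⟨hdvd, htile⟩ := (pv_cond_iff s n hn1 (by omega)).mp hcond'
    exact ⟨n, hn1, hn2, hdvd, htile⟩
  · rintro ⟨n, hn1, hn2, hdvd, htile⟩
    refine ⟨(n : Int), ?_, ?_⟩
    · rw [PySem.List.mem_pyRange_one]
      constructor
      · exact_mod_cast hn1
      · have : (n : Int) ≤ ((s.length / 2 : Nat) : Int) := by exact_mod_cast hn2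
        omega
    · rw [PySem.List.slice_to s (by omega), PySem.Chars.len_eq]
      have : Int.toNat (n : Int) = n := by omega
      rw [this]
      have hcond' := (pv_cond_iff s n hn1 (by omega)).mpr ⟨hdvd, htile⟩
      exact_mod_cast hcond'

theorem pv_mid_eq (s : List Char) (hL : 0 < s.length) :
    PySem.List.slice (s ++ s) (some 1) (some (-1)) =
      ((s ++ s).drop 1).take (s.length + s.length - 2) := by
  have h1 : PySem.List.slice (s ++ s) (some 1) (some (-1))
      = ((s ++ s).drop (PySem.List.clampIdx (s ++ s).length 1)).take
          (PySem.List.clampIdx (s ++ s).length (-1) - PySem.List.clampIdx (s ++ s).length 1) := by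
    simp [PySem.List.slice]
  rw [h1, PySem.List.clampIdx_neg_one]
  have : PySem.List.clampIdx (s ++ s).length 1 = 1 := by
    rw [show (1 : Int) = ((1 : Nat) : Int) by norm_num, PySem.List.clampIdx_natCast]
    simp; omega
  rw [this]
  simp
  omega

-- prefix at an offset i ≤ L into s++s is exactly a rotation fix
theorem pv_prefix_drop_iff (s : List Char) (i : Nat) (hi : i ≤ s.length) :
    s <+: (s ++ s).drop i ↔ s.drop i ++ s.take i = s := by
  have hdrop : (s ++ s).drop i = s.drop i ++ s := by
    rw [List.drop_append, Nat.sub_eq_zero_of_le hi]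
    simp
  rw [hdrop, List.prefix_iff_eq_take]
  have htake : (s.drop i ++ s).take s.length = s.drop i ++ s.take i := by
    rw [List.take_append, List.take_of_length_le (by simp)]
    congr 1
    congr 1
    simp; omega
  rw [htake]
  constructor
  · intro h; exact h.symm
  · intro h; exact h.symm

theorem pv_B_iff (num : Int) (hs : PySem.Int.toChars num ≠ []) :
    is_invalid_id_part_two_alt num = true ↔
      ∃ i : Nat, 1 ≤ i ∧ i ≤ (PySem.Int.toChars num).length - 1 ∧
        (PySem.Int.toChars num).drop i ++ (PySem.Int.toChars num).take i
          = PySem.Int.toChars num := by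
  set s := PySem.Int.toChars num with hsdef
  have hL : 0 < s.length := List.length_pos_iff.mpr hs
  show PySem.Chars.isIn s (PySem.List.slice (s ++ s) (some 1) (some (-1))) = true ↔ _
  rw [← PySem.Chars.exists_prefix_drop_iff_isIn, pv_mid_eq s hL]
  constructor
  · rintro ⟨j, hpre⟩
    rw [List.drop_take, List.drop_drop] at hpre
    have hcl : s.length ≤ s.length + s.length - 2 - j ∧ s <+: (s ++ s).drop (1 + j) := by
      have := List.prefix_take_iff.mp hpre
      exact ⟨this.2, this.1⟩
    have hjle : j + 2 ≤ s.length := by omega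
    refine ⟨1 + j, by omega, by omega, ?_⟩
    exact (pv_prefix_drop_iff s (1 + j) (by omega)).mp hcl.2
  · rintro ⟨i, hi1, hi2, hrot⟩
    refine ⟨i - 1, ?_⟩
    rw [List.drop_take, List.drop_drop]
    have h1i : 1 + (i - 1) = i := by omega
    rw [h1i]
    apply List.prefix_take_iff.mpr
    exact ⟨(pv_prefix_drop_iff s i (by omega)).mpr hrot, by omega⟩

theorem pv_main (s : List Char) (hs : s ≠ []) :
    (∃ d : Nat, 1 ≤ d ∧ d ≤ s.length / 2 ∧ d ∣ s.length ∧
      (List.replicate (s.length / d) (s.take d)).flatten = s) ↔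
    (∃ i : Nat, 1 ≤ i ∧ i ≤ s.length - 1 ∧ s.drop i ++ s.take i = s) := by
  have hL : 0 < s.length := List.length_pos_iff.mpr hs
  constructor
  · rintro ⟨d, hd1, hd2, hdvd, htile⟩
    have h2d : d * 2 ≤ s.length := (Nat.le_div_iff_mul_le (by omega)).mp hd2
    obtain ⟨k, hk⟩ := hdvd
    have hdk : s.length / d = k := by rw [hk, Nat.mul_div_cancel_left _ (by omega)]
    have hk2 : 2 ≤ k := by
      rcases k with _ | _ | k
      · omega
      · omega
      · omega
    rw [hdk] at htile
    obtain ⟨m, hm⟩ : ∃ m, k = m + 1 := ⟨k - 1, by omega⟩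
    subst hm
    have hflat : (List.replicate (m + 1) (s.take d)).flatten
        = s.take d ++ (List.replicate m (s.take d)).flatten := by
      rw [List.replicate_succ, List.flatten_cons]
    have hlentake : (s.take d).length = d := by simp; omega
    refine ⟨d, hd1, by omega, ?_⟩
    have hdrop : s.drop d = (List.replicate m (s.take d)).flatten := by
      have h := List.drop_left (l₁ := s.take d) (l₂ := (List.replicate m (s.take d)).flatten)
      rw [hlentake] at h
      conv_lhs => rw [← htile, hflat]
      exact h
    -- s.drop d ++ s.take d = flatten (replicate m p) ++ p = flatten (replicate (m+1) p) = s
    rw [hdrop]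
    have : (List.replicate m (s.take d)).flatten ++ s.take d
        = (List.replicate (m + 1) (s.take d)).flatten := by
      rw [List.replicate_succ' , List.flatten_append]
      simp
    rw [this, htile]
  · rintro ⟨i, hi1, hi2, hrot⟩
    have hP : ∃ j, 0 < j ∧ s.rotate j = s :=
      ⟨i, by omega, by rw [List.rotate_eq_drop_append_take (by omega)]; exact hrot⟩
    set d := Nat.find hP with hdname
    have hdspec := Nat.find_spec hP
    have hdvd := pv_rot_dvd s d hdspec (fun m hm => Nat.find_min hP hm)
    have hdL : d ∣ s.length := hdvd s.length (List.rotate_length s)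
    have hdle : d ≤ i := Nat.find_min' hP ⟨by omega, by rw [List.rotate_eq_drop_append_take (by omega)]; exact hrot⟩
    obtain ⟨k, hk⟩ := hdL
    have hk2 : 2 ≤ k := by
      rcases k with _ | _ | k
      · omega
      · omega
      · omega
    have hrotd : s.drop d ++ s.take d = s := by
      rw [← List.rotate_eq_drop_append_take (by omega)]; exact hdspec.2
    have hlentake : (s.take d).length = d := by simp; omega
    have hcomm : s.take d ++ s = s ++ s.take d := by
      calc s.take d ++ s = s.take d ++ (s.drop d ++ s.take d) := by rw [hrotd]
        _ = (s.take d ++ s.drop d) ++ s.take d := by rw [List.append_assoc]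
        _ = s ++ s.take d := by rw [List.take_append_drop]
    have htile := pv_comm_tiling (s.take d) k s (by rw [hlentake, hk]) hcomm
    have h2d : d * 2 ≤ s.length := by
      rw [hk]; exact Nat.mul_le_mul_left d hk2
    have hdk : s.length / d = k := by rw [hk, Nat.mul_div_cancel_left _ (by omega)]
    refine ⟨d, by omega, (Nat.le_div_iff_mul_le (by omega)).mpr h2d, ⟨k, hk⟩, ?_⟩
    rw [hdk]
    exact htile.symm

-- ===== VERDICT (by name: the statement is the Claim_ definition above) =====
theorem is_invalid_id_part_two_spec : Claim_equal_is_invalid_id_part_two := by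
  intro num _
  unfold Spec_is_invalid_id_part_two
  have hs := pv_toChars_ne_nil num
  have h := (pv_A_iff num hs).trans
    ((pv_main (PySem.Int.toChars num) hs).trans (pv_B_iff num hs).symm)
  cases ha : is_invalid_id_part_two num <;> cases hb : is_invalid_id_part_two_alt num <;>
    simp_all
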